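-- pv_equiv track=rewrite | github.com/maraGheorghe/AI | AI01/main.py | solve_8_a
-- ===== SOURCE A (Python) =====
-- from queue import Queue
--
-- def solve_8_a(n):
--     numbers = []
--     queue = Queue()
--     queue.put("1")
--     for i in range(n):
--         current = queue.get()
--         numbers.append(int(current))
--         queue.put(current + "0")
--         queue.put(current + "1")
--     return numbers
-- ===== SOURCE B (Python) =====
-- def solve_8_a(n):
--     # the i-th (1-indexed) decimal number with only 0/1 digits is bin(i) read as decimal
--     return [int(bin(i + 1)[2:]) for i in range(n)]
-- ===== Notes on version B (the rewrite author's own statement) =====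
-- stated objective: faster
-- what changed: Replaced the BFS string queue (dequeue, parse with int(), enqueue two children) with a closed-form index-to-value map: the i-th emitted number is the binary expansion of i read as a decimal literal, so B is a single list comprehension over range(n) with no queue and no string growth.
import Mathlib
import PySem

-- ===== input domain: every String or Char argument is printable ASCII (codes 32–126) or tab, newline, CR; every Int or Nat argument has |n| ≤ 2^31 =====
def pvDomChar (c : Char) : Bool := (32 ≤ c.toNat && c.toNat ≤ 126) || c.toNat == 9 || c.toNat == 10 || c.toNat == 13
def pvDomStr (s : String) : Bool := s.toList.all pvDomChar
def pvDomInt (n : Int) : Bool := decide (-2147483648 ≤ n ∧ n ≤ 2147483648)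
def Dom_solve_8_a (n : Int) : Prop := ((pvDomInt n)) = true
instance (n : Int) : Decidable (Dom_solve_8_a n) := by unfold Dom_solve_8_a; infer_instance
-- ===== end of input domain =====

-- B replaces A's BFS string queue by a closed-form map i ↦ (binary digits of i+1 read as decimal); equal output, no queue.

-- ===== PORT A =====
-- Strings are ported as List Char (PySem keeps string semantics on the list side).
-- int(current): hand port, exact for the nonempty all-digit strings A ever builds
-- (no sign/whitespace/underscores), where int() is the decimal fold below.
def pvParseDigits (cs : List Char) : Int :=
  cs.foldl (fun a c => 10 * a + ((c.toNat : Int) - 48)) 0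

-- one body of A's for-loop: dequeue, append int(current), enqueue current+"0", current+"1"
def pvStepA (st : List Int × List (List Char)) : List Int × List (List Char) :=
  match st with
  | (numbers, []) => (numbers, [])   -- unreachable: A's queue is never empty (Queue.get would block)
  | (numbers, c :: q) => (numbers ++ [pvParseDigits c], q ++ [c ++ ['0'], c ++ ['1']])

def solve_8_a (n : Int) : List Int :=
  ((PySem.List.pyRange 0 n 1).foldl (fun st _ => pvStepA st) ([], [['1']])).1

-- ===== PORT B =====
-- int(bin(m)[2:]) of Source B: the binary digits of m read as a decimal number (library
-- composition ported as the corresponding numeric function; exact for m ≥ 1).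
def pvBinDec (m : Nat) : Int :=
  if m = 0 then 0 else 10 * pvBinDec (m / 2) + (m % 2)
decreasing_by exact Nat.div_lt_self (Nat.pos_of_ne_zero (by omega)) (by omega)

def solve_8_a_alt (n : Int) : List Int :=
  (PySem.List.pyRange 0 n 1).map (fun i => pvBinDec (i + 1).toNat)

-- ===== PRECONDITION & SPEC =====
def Spec_solve_8_a (n : Int) (out : List Int) : Prop := out = solve_8_a_alt n
instance (n : Int) (out : List Int) : Decidable (Spec_solve_8_a n out) := by unfold Spec_solve_8_a; infer_instance

-- ===== CLAIM (what is proved, stated in full; the proofs are below) =====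
def Claim_equal_solve_8_a : Prop := ∀ (n : Int), Dom_solve_8_a n → Spec_solve_8_a n (solve_8_a n)

-- ===== LEMMAS AND PROOFS =====

-- the binary-digit string of m (m ≥ 1), exactly as A's queue builds it
def pvSb (m : Nat) : List Char :=
  if m ≤ 1 then ['1'] else pvSb (m / 2) ++ [if m % 2 = 1 then '1' else '0']
decreasing_by exact Nat.div_lt_self (by omega) (by omega)

theorem pvBinDec_zero : pvBinDec 0 = 0 := by rw [pvBinDec]; norm_num

theorem pvBinDec_pos (m : Nat) (h : m ≠ 0) :
    pvBinDec m = 10 * pvBinDec (m / 2) + (m % 2 : Nat) := by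
  rw [pvBinDec]; simp [h]

theorem pvParseDigits_append (xs : List Char) (c : Char) :
    pvParseDigits (xs ++ [c]) = 10 * pvParseDigits xs + ((c.toNat : Int) - 48) := by
  simp [pvParseDigits, List.foldl_append]

theorem pvParse_sb (m : Nat) (hm : 1 ≤ m) : pvParseDigits (pvSb m) = pvBinDec m := by
  induction m using Nat.strong_induction_on with
  | _ m ih =>
    by_cases h1 : m ≤ 1
    · have : m = 1 := by omega
      subst this
      have hsb : pvSb 1 = ['1'] := by rw [pvSb]; norm_num
      rw [hsb, pvBinDec_pos 1 (by omega)]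
      norm_num [pvParseDigits, pvBinDec_zero]
      decide
    · rw [pvSb, pvBinDec_pos m (by omega)]
      simp only [if_neg h1, pvParseDigits_append]
      rw [ih (m / 2) (Nat.div_lt_self (by omega) (by omega)) (by omega)]
      rcases Nat.mod_two_eq_zero_or_one m with h | h <;> simp [h]

theorem pvSb_double (j : Nat) (hj : 1 ≤ j) : pvSb (2 * j) = pvSb j ++ ['0'] := by
  rw [pvSb]
  have : ¬ 2 * j ≤ 1 := by omega
  simp [this, Nat.mul_div_cancel_left j (by omega : 0 < 2), Nat.mul_mod_right]

theorem pvSb_double_succ (j : Nat) (hj : 1 ≤ j) : pvSb (2 * j + 1) = pvSb j ++ ['1'] := by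
  rw [pvSb]
  have h1 : ¬ 2 * j + 1 ≤ 1 := by omega
  have h2 : (2 * j + 1) / 2 = j := by omega
  have h3 : (2 * j + 1) % 2 = 1 := by omega
  simp [h1, h2, h3]

-- the fold ignores the list elements: it is iteration by length
theorem foldl_stepA_length (l : List Int) (st : List Int × List (List Char)) :
    l.foldl (fun st _ => pvStepA st) st = (fun s => pvStepA s)^[l.length] st := by
  induction l generalizing st with
  | nil => rfl
  | cons x xs ih => simp [List.foldl_cons, ih, Function.iterate_succ_apply]

-- loop invariant: emitting index j with queue sb j .. sb (2j-1)
theorem pvIterA_inv (k : Nat) : ∀ (j : Nat), 1 ≤ j → ∀ (nums : List Int),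
    (fun s => pvStepA s)^[k] (nums, (List.range' j j).map pvSb)
      = (nums ++ (List.range' j k).map pvBinDec, (List.range' (j + k) (j + k)).map pvSb) := by
  induction k with
  | zero => intro j hj nums; simp
  | succ k ih =>
    intro j hj nums
    rw [Function.iterate_succ_apply]
    have hq : (List.range' j j).map pvSb = pvSb j :: ((List.range' (j+1) (j-1)).map pvSb) := by
      have : List.range' j j = j :: List.range' (j+1) (j-1) := by
        cases j with
        | zero => omega
        | succ j' => simp [List.range'_succ]
      rw [this, List.map_cons]
    rw [hq]
    show (fun s => pvStepA s)^[k]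
        (nums ++ [pvParseDigits (pvSb j)],
         ((List.range' (j+1) (j-1)).map pvSb) ++ [pvSb j ++ ['0'], pvSb j ++ ['1']]) = _
    have hqueue : ((List.range' (j+1) (j-1)).map pvSb) ++ [pvSb j ++ ['0'], pvSb j ++ ['1']]
        = (List.range' (j+1) (j+1)).map pvSb := by
      rw [← pvSb_double j hj, ← pvSb_double_succ j hj]
      have hsplit : List.range' (j+1) (j+1) = List.range' (j+1) (j-1) ++ [2*j, 2*j+1] := by
        have hlen : j + 1 = (j - 1) + 1 + 1 := by omega
        rw [hlen, List.range'_concat, List.range'_concat, List.append_assoc]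
        congr 1
        simp only [List.singleton_append, List.cons.injEq]
        refine ⟨by omega, by omega, trivial⟩
      rw [hsplit]
      simp
    rw [hqueue, ih (j+1) (by omega) (nums ++ [pvParseDigits (pvSb j)])]
    rw [pvParse_sb j hj]
    rw [show j + (k+1) = j+1+k from by omega, List.range'_succ]
    simp

theorem pyRange_toNat (n : Int) :
    PySem.List.pyRange 0 n 1 = (List.range n.toNat).map (fun (k : Nat) => (k : Int)) := by
  by_cases h : 0 ≤ n
  · have hn : n = (n.toNat : Int) := by omega
    rw [hn, PySem.List.pyRange_zero_natCast, Int.toNat_natCast]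
  · have h0 : n.toNat = 0 := by omega
    rw [h0]
    simp [PySem.List.pyRange]
    omega

-- ===== VERDICT (by name: the statement is the Claim_ definition above) =====
theorem solve_8_a_spec : Claim_equal_solve_8_a := by
  intro n _
  unfold Spec_solve_8_a solve_8_a solve_8_a_alt
  rw [pyRange_toNat, foldl_stepA_length]
  have hlen : ((List.range n.toNat).map (fun (k : Nat) => (k : Int))).length = n.toNat := by simp
  rw [hlen]
  have hsb1 : pvSb 1 = ['1'] := by rw [pvSb]; norm_num
  have hs1 : ([['1']] : List (List Char)) = (List.range' 1 1).map pvSb := by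
    simp [List.range'_one, hsb1]
  rw [hs1, pvIterA_inv n.toNat 1 (by omega) []]
  simp only [List.nil_append]
  apply List.ext_getElem (by simp [List.length_range'])
  intro i h1 h2
  simp only [List.getElem_map, List.getElem_range']
  rw [List.getElem_range]
  congr 1
  omega
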